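-- pv_equiv track=rewrite | github.com/shavak/advent_of_code | Day_03/day_03b.py | mode_filter
-- ===== SOURCE A (Python) =====
-- def mode_filter(x, n, oxygen = True):
--     m = len(x)
--     u = list(range(m))
--     k = n - 1
--     while (m > 1) and (k >= 0):
--         v = [[], []]
--         for i in range(m):
--             j = u[i]
--             v[(x[j] & (1 << k)) >> k].append(j)
--         q = [len(v[0]), len(v[1])]
--         b = oxygen == 1
--         if q[0] > q[1]:
--             b = oxygen == 0
--         if (q[b] == 0):
--             break
--         u = v[b]
--         m = q[b]
--         k -= 1
--     return x[u[0]]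
-- ===== SOURCE B (Python) =====
-- def mode_filter(x, n, oxygen=True):
--     nb = n if n > 0 else 0
--     mask = (1 << nb) - 1
--     # sort once by the n-bit key; the surviving candidate set is always a
--     # contiguous block [lo, hi) of this sorted array
--     pairs = sorted(((v & mask, i) for i, v in enumerate(x)), key=lambda p: p[0])
--     lo, hi = 0, len(pairs)
--     k = nb - 1
--     while hi - lo > 1 and k >= 0:
--         # keys in the block agree on all bits above k, so bit k is monotone
--         # along the block: binary-search the first position with bit k set
--         a, b = lo, hi
--         while a < b:
--             mid = (a + b) // 2
--             if ((pairs[mid][0] >> k) & 1) != 0: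
--                 b = mid
--             else:
--                 a = mid + 1
--         zeros, ones = a - lo, hi - a
--         keep_ones = oxygen
--         if zeros > ones:
--             keep_ones = not oxygen
--         if keep_ones:
--             if ones == 0:
--                 break
--             lo = a
--         else:
--             if zeros == 0:
--                 break
--             hi = a
--         k -= 1
--     return x[min(i for _, i in pairs[lo:hi])]
-- ===== Notes on version B (the rewrite author's own statement) =====
-- stated objective: alternative
-- what changed: B sorts the (n-bit key, index) pairs once and keeps the surviving candidate set as a contiguous block [lo,hi) of the sorted array, finding each bit-split by binary search, instead of A's per-bit rebucketing scan over an index list; the survivor is recovered as the minimum original index in the final block.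
import Mathlib
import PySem

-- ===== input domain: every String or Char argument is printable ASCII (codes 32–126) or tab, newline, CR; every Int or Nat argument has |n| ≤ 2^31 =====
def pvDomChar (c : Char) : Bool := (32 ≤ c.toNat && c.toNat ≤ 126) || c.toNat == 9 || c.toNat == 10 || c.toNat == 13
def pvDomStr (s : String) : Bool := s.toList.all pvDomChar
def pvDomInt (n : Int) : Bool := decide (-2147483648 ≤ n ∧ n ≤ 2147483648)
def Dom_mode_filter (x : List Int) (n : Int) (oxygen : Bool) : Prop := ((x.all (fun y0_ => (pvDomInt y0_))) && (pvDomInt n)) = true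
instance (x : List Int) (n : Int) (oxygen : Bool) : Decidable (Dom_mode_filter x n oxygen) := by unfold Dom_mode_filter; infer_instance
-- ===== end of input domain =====

-- B sorts the records once by their n-bit key and keeps the candidate set as a contiguous block
-- of the sorted array, locating each bit-split by binary search instead of scanning the
-- candidates for every bit; objective: alternative algorithm.

-- ===== PORT A =====
-- (x[j] & (1 << k)) >> k, k ≥ 0
def mfBit (v : Int) (k : Nat) : Int := (PySem.Int.band v (1 <<< k)) >>> k

-- A's while loop; fuel K encodes k = K - 1 (k runs n-1, n-2, …, 0); A's variable m is always
-- len(u), carried here as u.length.  x[j] is ported as pyGetD x j 0: every j in u is a valid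
-- index of x, so the default is never read.
def mfLoop (x : List Int) (oxygen : Bool) : List Int → Nat → List Int
  | u, 0 => u
  | u, kk+1 =>
    if 1 < u.length then
      let v := u.foldl (fun (v : List Int × List Int) j =>
        if mfBit (PySem.List.pyGetD x j 0) kk == 1 then (v.1, v.2 ++ [j]) else (v.1 ++ [j], v.2))
        ([], [])
      let q0 := v.1.length
      let q1 := v.2.length
      let b : Bool := if q0 > q1 then oxygen == false else oxygen == true
      let qb := if b then q1 else q0
      if qb = 0 then u
      else mfLoop x oxygen (if b then v.2 else v.1) kk
    else u

def mode_filter (x : List Int) (n : Int) (oxygen : Bool) : Int :=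
  PySem.List.pyGetD x
    (PySem.List.pyGetD (mfLoop x oxygen (PySem.List.pyRange 0 (x.length : Int) 1) n.toNat) 0 0) 0

-- ===== PORT B =====
-- ((pairs[mid][0] >> k) & 1) != 0, the binary-search probe at position mid
def mfProbe (P : List (Int × Int)) (k : Nat) (mid : Int) : Bool :=
  PySem.Int.band ((PySem.List.pyGetD P mid (0, 0)).1 >>> k) 1 != 0

-- the inner `while a < b` binary search of Source B
def mfSearch (P : List (Int × Int)) (k : Nat) (a b : Int) : Int :=
  if h : a < b then
    if mfProbe P k (PySem.Int.floordiv (a + b) 2) then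
      mfSearch P k a (PySem.Int.floordiv (a + b) 2)
    else
      mfSearch P k (PySem.Int.floordiv (a + b) 2 + 1) b
  else a
termination_by (b - a).toNat
decreasing_by
  · have h1 : a ≤ PySem.Int.floordiv (a + b) 2 :=
      (PySem.Int.le_floordiv_iff_mul_le (by omega)).mpr (by omega)
    have h2 : PySem.Int.floordiv (a + b) 2 < b :=
      (PySem.Int.floordiv_lt_iff_lt_mul (by omega)).mpr (by omega)
    omega
  · have h1 : a ≤ PySem.Int.floordiv (a + b) 2 :=
      (PySem.Int.le_floordiv_iff_mul_le (by omega)).mpr (by omega)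
    have h2 : PySem.Int.floordiv (a + b) 2 < b :=
      (PySem.Int.floordiv_lt_iff_lt_mul (by omega)).mpr (by omega)
    omega

-- the outer `while hi - lo > 1 and k >= 0` loop of Source B; fuel K encodes k = K - 1
def mfBLoop (P : List (Int × Int)) (oxygen : Bool) : Int → Int → Nat → Int × Int
  | lo, hi, 0 => (lo, hi)
  | lo, hi, kk+1 =>
    if hi - lo > 1 then
      let a := mfSearch P kk lo hi
      let zeros := a - lo
      let ones := hi - a
      let keep_ones : Bool := if zeros > ones then !oxygen else oxygen
      if keep_ones then
        if ones = 0 then (lo, hi) else mfBLoop P oxygen a hi kk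
      else
        if zeros = 0 then (lo, hi) else mfBLoop P oxygen lo a kk
    else (lo, hi)

def mode_filter_alt (x : List Int) (n : Int) (oxygen : Bool) : Int :=
  let nb : Int := if n > 0 then n else 0
  let mask : Int := (1 <<< nb.toNat) - 1       -- 1 << nb; nb ≥ 0 so the Nat shift is exact
  let pairs := PySem.List.sorted
    ((PySem.List.enumerate x 0).map (fun iv => (PySem.Int.band iv.2 mask, iv.1)))
    (fun p => p.1) false
  let r := mfBLoop pairs oxygen 0 (pairs.length : Int) nb.toNat
  let seg := PySem.List.slice pairs (some r.1) (some r.2)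
  -- min over a nonempty generator: the default 0 is never read (the block is nonempty)
  PySem.List.pyGetD x ((PySem.List.min? (seg.map (fun p => p.2)) (fun i => i)).getD 0) 0

-- ===== PRECONDITION & SPEC =====
-- Python A raises IndexError on x = [] (x[u[0]] with u = []); nothing else is excluded.
def Pre_mode_filter (x : List Int) (n : Int) (oxygen : Bool) : Prop := x ≠ []
instance (x : List Int) (n : Int) (oxygen : Bool) : Decidable (Pre_mode_filter x n oxygen) := by
  unfold Pre_mode_filter; infer_instance

def pvWitness_mode_filter : List Int × Int × Bool := ([4, 5, 6, 7, 2], 3, true)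

def Spec_mode_filter (x : List Int) (n : Int) (oxygen : Bool) (out : Int) : Prop := out = mode_filter_alt x n oxygen
instance (x : List Int) (n : Int) (oxygen : Bool) (out : Int) : Decidable (Spec_mode_filter x n oxygen out) := by unfold Spec_mode_filter; infer_instance

-- ===== CLAIM (what is proved, stated in full; the proofs are below) =====
def Claim_equal_mode_filter : Prop := ∀ (x : List Int) (n : Int) (oxygen : Bool), Dom_mode_filter x n oxygen → Pre_mode_filter x n oxygen → Spec_mode_filter x n oxygen (mode_filter x n oxygen)

-- ===== LEMMAS AND PROOFS =====

-- proof-side abbreviations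
def gOf (x : List Int) : Int → Int := fun j => PySem.List.pyGetD x j 0
def pOf (x : List Int) (kk : Nat) : Int → Bool := fun j => mfBit (PySem.List.pyGetD x j 0) kk == 1
def keyOf (x : List Int) (nb : Nat) (j : Int) : Int :=
  PySem.Int.band (PySem.List.pyGetD x j 0) ((2:Int) ^ nb - 1)
def pairOf (x : List Int) (nb : Nat) (j : Int) : Int × Int := (keyOf x nb j, j)
-- the block P[lo:hi] (Nat bounds)
def segN (P : List (Int × Int)) (lo hi : Nat) : List (Int × Int) := (P.drop lo).take (hi - lo)
-- (v >> k) & 1, the probe value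
def bit01 (v : Int) (k : Nat) : Int := PySem.Int.band (v >>> k) 1
-- the probe as a Boolean predicate on a record
def qpred (k : Nat) (e : Int × Int) : Bool := bit01 e.1 k != 0

-- ===== bit arithmetic =====
lemma cast_two_pow (nb : Nat) : ((2 ^ nb : Nat) : Int) = (2:Int) ^ nb := by norm_cast

lemma negSucc_emod_pow (m nb : Nat) :
    (Int.negSucc m) % ((2:Int) ^ nb) = ((2 ^ nb - 1 - m % 2 ^ nb : Nat) : Int) := by
  have h2 : (0:Nat) < 2 ^ nb := by positivity
  have hr : m % 2 ^ nb < 2 ^ nb := Nat.mod_lt m h2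
  have hm : Int.negSucc m = -(m:Int) - 1 := by simp [Int.negSucc_eq]; ring
  have hm' : (m : Int) = ((2:Int) ^ nb) * ((m / 2 ^ nb : Nat) : Int) + ((m % 2 ^ nb : Nat) : Int) := by
    rw [← cast_two_pow]; exact_mod_cast (Nat.div_add_mod m (2 ^ nb)).symm
  have hcast : ((2 ^ nb - 1 - m % 2 ^ nb : Nat) : Int) = (2:Int) ^ nb - 1 - ((m % 2 ^ nb : Nat) : Int) := by
    have := cast_two_pow nb; omega
  have key : Int.negSucc m = ((2 ^ nb - 1 - m % 2 ^ nb : Nat) : Int) + (-(((m / 2 ^ nb : Nat) : Int)) - 1) * (2:Int) ^ nb := by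
    rw [hm, hcast]; linarith [hm']
  rw [key, Int.add_mul_emod_self_right]
  apply Int.emod_eq_of_lt (by positivity)
  have := cast_two_pow nb
  omega

-- v & (2^nb - 1) is Python's v % 2^nb
lemma band_mask_eq_emod (v : Int) (nb : Nat) :
    PySem.Int.band v ((2:Int) ^ nb - 1) = v % ((2:Int) ^ nb) := by
  have h2 : (0:Nat) < 2 ^ nb := by positivity
  have hmask : (2:Int) ^ nb - 1 = ((2 ^ nb - 1 : Nat) : Int) := by
    have := cast_two_pow nb; omega
  cases v with
  | ofNat m =>
    rw [hmask, show (Int.ofNat m) = ((m:Nat):Int) from rfl, PySem.Int.band_natCast,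
      Nat.and_two_pow_sub_one_eq_mod]
    rw [← cast_two_pow]; push_cast; ring
  | negSucc m =>
    rw [negSucc_emod_pow, hmask]
    have hd : ((2 ^ nb - 1 : Nat) : Int).toNat = 2 ^ nb - 1 := by omega
    have hneg : (-Int.negSucc m - 1).toNat = m := by
      simp [Int.negSucc_eq]
    simp only [PySem.Int.band, hd, hneg]
    rw [if_neg (not_le.mpr (Int.negSucc_lt_zero m)), if_pos (by positivity),
      Nat.and_comm, Nat.and_two_pow_sub_one_eq_mod]

lemma mf_nat_core (n k : Nat) : (n &&& 2^k) >>> k = (n >>> k) &&& 1 := by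
  have h1 : (n >>> k) &&& 1 = ((n >>> k).testBit 0).toNat := by
    simpa using Nat.and_two_pow (n >>> k) 0
  rw [h1, Nat.testBit_shiftRight, Nat.and_two_pow]
  cases htb : n.testBit (k + 0) <;>
    simp [Nat.shiftRight_eq_div_pow, Nat.div_self (Nat.pow_pos (by norm_num : 0 < 2) (n := k))]

lemma mf_nat_core_neg (m k : Nat) : (2^k - (2^k &&& m)) >>> k = 1 - (1 &&& (m >>> k)) := by
  have h1 : 1 &&& (m >>> k) = ((m >>> k).testBit 0).toNat := by
    simpa using Nat.two_pow_and (m >>> k) 0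
  rw [h1, Nat.testBit_shiftRight, Nat.two_pow_and]
  cases htb : m.testBit (k + 0) <;>
    simp [Nat.shiftRight_eq_div_pow, Nat.div_self (Nat.pow_pos (by norm_num : 0 < 2) (n := k))]

-- A's bit extraction (v & 2^k) >> k equals (v >> k) & 1
lemma mfBit_eq_bit01 (v : Int) (k : Nat) : mfBit v k = bit01 v k := by
  unfold mfBit bit01
  cases v with
  | ofNat n =>
    have hL : PySem.Int.band (Int.ofNat n) ((2^k : Nat) : Int) = ((n &&& 2^k : Nat) : Int) := by
      simpa using PySem.Int.band_natCast n (2^k)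
    have hR : PySem.Int.band (Int.ofNat (n >>> k)) ((1:Nat) : Int) = ((n >>> k &&& 1 : Nat) : Int) := by
      simpa using PySem.Int.band_natCast (n >>> k) 1
    rw [Nat.one_shiftLeft, hL]
    show ((((n &&& 2^k) >>> k : Nat)) : Int) = PySem.Int.band (Int.ofNat (n >>> k)) 1
    rw [show ((1:Int) = ((1:Nat):Int)) from rfl, hR, mf_nat_core]
  | negSucc m =>
    rw [Nat.one_shiftLeft]
    have h2 : ((2:Int)^k).toNat = 2^k := by
      rw [show ((2:Int)^k) = ((2^k : Nat) : Int) by push_cast; ring, Int.toNat_natCast]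
    have hL : PySem.Int.band (Int.negSucc m) ((2^k : Nat) : Int) = ((2^k - (2^k &&& m) : Nat) : Int) := by
      simp [PySem.Int.band, h2]
    have h3 : ((m:Int) >>> k).toNat = m >>> k := by
      rw [show ((m:Int) >>> k) = ((m >>> k : Nat) : Int) from rfl, Int.toNat_natCast]
    have hR : PySem.Int.band (Int.negSucc (m >>> k)) 1 = ((1 - (1 &&& (m >>> k)) : Nat) : Int) := by
      simp [PySem.Int.band, h3]
    rw [hL]
    show ((((2^k - (2^k &&& m)) >>> k : Nat)) : Int) = PySem.Int.band (Int.negSucc (m >>> k)) 1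
    rw [hR, mf_nat_core_neg]

lemma bit01_01 (v : Int) (k : Nat) : bit01 v k = 0 ∨ bit01 v k = 1 := by
  have h := PySem.Int.band_one (v >>> k)
  have h1 := PySem.Int.mod_nonneg (v >>> k) (b := 2) (by norm_num)
  have h2 := PySem.Int.mod_lt (v >>> k) (b := 2) (by norm_num)
  unfold bit01; omega

-- nonneg characterisation of bit01 by Nat arithmetic
lemma bit01_toNat (w : Int) (hw : 0 ≤ w) (k : Nat) :
    bit01 w k = if w.toNat / 2 ^ k % 2 = 1 then 1 else 0 := by
  obtain ⟨m, rfl⟩ := Int.eq_ofNat_of_zero_le hw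
  unfold bit01
  have h3 : ((m:Int) >>> k) = ((m >>> k : Nat) : Int) := rfl
  rw [h3, show ((1:Int) = ((1:Nat):Int)) from rfl, PySem.Int.band_natCast,
    Nat.and_one_is_mod, Nat.shiftRight_eq_div_pow]
  rcases Nat.mod_two_eq_zero_or_one (m / 2 ^ k) with h | h <;> simp [h]

-- equal high bits + ≤ force bit k to be monotone
lemma nat_bit_mono (p a b : Nat) (hle : a ≤ b) (hdiv : a / (p * 2) = b / (p * 2))
    (ha : a / p % 2 = 1) : b / p % 2 = 1 := by
  have h1 : a / (p * 2) = a / p / 2 := by rw [Nat.div_div_eq_div_mul]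
  have h2 : b / (p * 2) = b / p / 2 := by rw [Nat.div_div_eq_div_mul]
  have h3 : a / p ≤ b / p := Nat.div_le_div_right hle
  omega

lemma nat_mod_pow_bit (m nb k : Nat) (hk : k < nb) :
    m % 2 ^ nb / 2 ^ k % 2 = m / 2 ^ k % 2 := by
  have h1 := Nat.testBit_mod_two_pow m nb k
  rw [Nat.testBit_eq_decide_div_mod_eq, Nat.testBit_eq_decide_div_mod_eq] at h1
  simp only [hk, decide_true, Bool.true_and, decide_eq_decide] at h1
  have h2 := Nat.mod_two_eq_zero_or_one (m % 2 ^ nb / 2 ^ k)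
  have h3 := Nat.mod_two_eq_zero_or_one (m / 2 ^ k)
  omega

lemma compl_div (p Q r : Nat) (hp : 0 < p) (hQ : Q % 2 = 0) (hr : r < p * Q) :
    (p * Q - 1 - r) / p % 2 = 1 - r / p % 2 := by
  have hb : r % p < p := Nat.mod_lt r hp
  have hra := Nat.div_add_mod r p
  have haQ : r / p < Q := Nat.div_lt_of_lt_mul (by omega)
  obtain ⟨c, hc⟩ : ∃ c, Q = r / p + 1 + c := ⟨Q - r / p - 1, by omega⟩
  have hexp : p * Q = p * (r / p) + p + p * c := by rw [hc]; ring
  have hkey : p * Q - 1 - r = p * c + (p - 1 - r % p) := by omega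
  rw [hkey, Nat.mul_add_div hp, Nat.div_eq_of_lt (by omega)]
  omega

-- reducing mod 2^nb does not change the bits below nb
lemma bit01_emod (v : Int) (nb k : Nat) (hk : k < nb) :
    bit01 (v % ((2:Int) ^ nb)) k = bit01 v k := by
  have h2 : (0:Nat) < 2 ^ nb := by positivity
  cases v with
  | ofNat m =>
    have he : (Int.ofNat m) % ((2:Int) ^ nb) = ((m % 2 ^ nb : Nat) : Int) := by
      rw [show (Int.ofNat m) = ((m:Nat):Int) from rfl, ← cast_two_pow]
      push_cast; ring
    rw [he, bit01_toNat _ (by positivity), bit01_toNat _ (by simp)]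
    simp only [Int.toNat_natCast, show (Int.ofNat m).toNat = m from rfl,
      nat_mod_pow_bit m nb k hk]
  | negSucc m =>
    rw [negSucc_emod_pow, bit01_toNat _ (by positivity)]
    have h3 : ((m:Int) >>> k).toNat = m >>> k := by
      rw [show ((m:Int) >>> k) = ((m >>> k : Nat) : Int) from rfl, Int.toNat_natCast]
    have hR : bit01 (Int.negSucc m) k = ((1 - (1 &&& (m >>> k)) : Nat) : Int) := by
      unfold bit01
      simp [PySem.Int.band, h3]
    rw [hR]
    have hand : 1 &&& (m >>> k) = m / 2 ^ k % 2 := by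
      rw [Nat.and_comm, Nat.and_one_is_mod, Nat.shiftRight_eq_div_pow]
    have hto : ((2 ^ nb - 1 - m % 2 ^ nb : Nat) : Int).toNat = 2 ^ nb - 1 - m % 2 ^ nb := by
      simp
    rw [hto]
    have hcompl : (2 ^ nb - 1 - m % 2 ^ nb) / 2 ^ k % 2 = 1 - m % 2 ^ nb / 2 ^ k % 2 := by
      have := compl_div (2 ^ k) (2 ^ (nb - k)) (m % 2 ^ nb) (by positivity)
        (by rcases Nat.exists_eq_add_of_lt (by omega : 0 < nb - k) with ⟨c, hc⟩
            rw [show nb - k = c + 1 by omega, pow_succ]; omega)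
        (by rw [← pow_add, show k + (nb - k) = nb by omega]; exact Nat.mod_lt m h2)
      rwa [show 2 ^ k * 2 ^ (nb - k) - 1 - m % 2 ^ nb
          = 2 ^ nb - 1 - m % 2 ^ nb by rw [← pow_add, show k + (nb - k) = nb by omega]] at this
    rw [hcompl, nat_mod_pow_bit m nb k hk]
    have h4 := Nat.mod_two_eq_zero_or_one (m / 2 ^ k)
    rcases h4 with h | h <;> simp [h, hand]

lemma qpred_true_iff (k : Nat) (e : Int × Int) (he : 0 ≤ e.1) :
    qpred k e = true ↔ e.1.toNat / 2 ^ k % 2 = 1 := by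
  unfold qpred
  rw [bit01_toNat e.1 he k]
  rcases Nat.mod_two_eq_zero_or_one (e.1.toNat / 2 ^ k) with h | h <;> simp [h]

-- ===== binary search =====
lemma mfProbe_at (P : List (Int × Int)) (k : Nat) (t : Nat) (h : t < P.length) :
    mfProbe P k (t : Int) = qpred k (P[t]'h) := by
  unfold mfProbe qpred bit01
  rw [PySem.List.pyGetD_natCast, List.getD_eq_getElem P (0,0) (by exact_mod_cast h)]

lemma mfSearch_spec (P : List (Int × Int)) (k : Nat) (lo hi : Int)
    (mono : ∀ i j : Int, lo ≤ i → i ≤ j → j < hi →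
      mfProbe P k i = true → mfProbe P k j = true) :
    ∀ a b : Int, lo ≤ a → a ≤ b → b ≤ hi →
      (∀ i : Int, lo ≤ i → i < a → mfProbe P k i = false) →
      (∀ i : Int, b ≤ i → i < hi → mfProbe P k i = true) →
      a ≤ mfSearch P k a b ∧ mfSearch P k a b ≤ b ∧
      (∀ i : Int, lo ≤ i → i < mfSearch P k a b → mfProbe P k i = false) ∧
      (∀ i : Int, mfSearch P k a b ≤ i → i < hi → mfProbe P k i = true) := by
  intro a b
  fun_induction mfSearch P k a b with
  | case1 a b h hp ih =>
    intro ha hab hbhi hlow hhigh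
    have hm1 : a ≤ PySem.Int.floordiv (a + b) 2 :=
      (PySem.Int.le_floordiv_iff_mul_le (by omega)).mpr (by omega)
    have hm2 : PySem.Int.floordiv (a + b) 2 < b :=
      (PySem.Int.floordiv_lt_iff_lt_mul (by omega)).mpr (by omega)
    obtain ⟨c1, c2, c3, c4⟩ := ih ha hm1 (by omega) hlow
      (fun i hi1 hi2 => mono _ _ (by omega) hi1 hi2 hp)
    exact ⟨c1, by omega, c3, c4⟩
  | case2 a b h hp ih =>
    intro ha hab hbhi hlow hhigh
    have hm1 : a ≤ PySem.Int.floordiv (a + b) 2 :=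
      (PySem.Int.le_floordiv_iff_mul_le (by omega)).mpr (by omega)
    have hm2 : PySem.Int.floordiv (a + b) 2 < b :=
      (PySem.Int.floordiv_lt_iff_lt_mul (by omega)).mpr (by omega)
    obtain ⟨c1, c2, c3, c4⟩ := ih (by omega) (by omega) hbhi
      (fun i hi1 hi2 => by
        by_cases hia : i < a
        · exact hlow i hi1 hia
        · by_contra hc
          have hpi : mfProbe P k i = true := by
            cases hpi : mfProbe P k i with
            | true => rfl
            | false => exact absurd hpi hc
          have h5 := mono i (PySem.Int.floordiv (a + b) 2) hi1 (by omega) (by omega) hpi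
          exact absurd h5 hp)
      hhigh
    exact ⟨by omega, c2, c3, c4⟩
  | case3 a b h =>
    intro ha hab hbhi hlow hhigh
    exact ⟨le_refl a, hab, fun i h1 h2 => hlow i h1 h2,
      fun i h1 h2 => hhigh i (by omega) h2⟩

-- ===== segments =====
lemma segN_length (P : List (Int × Int)) (lo hi : Nat) (h1 : lo ≤ hi) (h2 : hi ≤ P.length) :
    (segN P lo hi).length = hi - lo := by
  simp [segN]; omega

lemma segN_append (P : List (Int × Int)) (lo s hi : Nat) (h1 : lo ≤ s) (h2 : s ≤ hi) :
    segN P lo hi = segN P lo s ++ segN P s hi := by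
  unfold segN
  rw [show hi - lo = (s - lo) + (hi - s) by omega, List.take_add]
  congr 2
  rw [List.drop_drop]
  congr 1
  omega

lemma mem_segN (P : List (Int × Int)) (lo hi : Nat) (hhi : hi ≤ P.length) (p : Int × Int) :
    p ∈ segN P lo hi ↔ ∃ (t : Nat) (h : lo + t < hi), p = P[lo + t]'(by omega) := by
  rw [List.mem_iff_getElem]
  constructor
  · rintro ⟨t, ht, rfl⟩
    have hlen : (segN P lo hi).length ≤ hi - lo := by
      simp [segN]
    refine ⟨t, by omega, ?_⟩
    unfold segN
    simp [List.getElem_take, List.getElem_drop]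
  · rintro ⟨t, ht, rfl⟩
    have hlen : (segN P lo hi).length = min (hi - lo) (P.length - lo) := by
      simp [segN]
    refine ⟨t, by omega, ?_⟩
    unfold segN
    simp [List.getElem_take, List.getElem_drop]

lemma getElem_mem_segN (P : List (Int × Int)) (lo hi t : Nat) (hhi : hi ≤ P.length)
    (h1 : lo ≤ t) (h2 : t < hi) : P[t]'(by omega) ∈ segN P lo hi := by
  rw [mem_segN P lo hi hhi]
  refine ⟨t - lo, by omega, ?_⟩
  congr 1
  omega

lemma mem_P_of_mem_segN (P : List (Int × Int)) (lo hi : Nat) (hhi : hi ≤ P.length)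
    (p : Int × Int) (hp : p ∈ segN P lo hi) : p ∈ P := by
  rw [mem_segN P lo hi hhi] at hp
  obtain ⟨t, ht, rfl⟩ := hp
  exact List.getElem_mem _

-- ===== A-side loop =====
lemma foldl_partition (p : Int → Bool) (l : List Int) (acc : List Int × List Int) :
    l.foldl (fun v j => if p j then (v.1, v.2 ++ [j]) else (v.1 ++ [j], v.2)) acc
      = (acc.1 ++ l.filter (fun j => !p j), acc.2 ++ l.filter p) := by
  induction l generalizing acc with
  | nil => simp
  | cons a t ih => by_cases h : p a <;> simp [h, ih]

lemma mfLoop_succ (x : List Int) (oxygen : Bool) (u : List Int) (kk : Nat) (h1 : 1 < u.length) :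
    mfLoop x oxygen u (kk+1) =
      if (if (u.filter (fun j => !pOf x kk j)).length > (u.filter (pOf x kk)).length
          then oxygen == false else oxygen == true)
      then (if (u.filter (pOf x kk)).length = 0 then u
            else mfLoop x oxygen (u.filter (pOf x kk)) kk)
      else (if (u.filter (fun j => !pOf x kk j)).length = 0 then u
            else mfLoop x oxygen (u.filter (fun j => !pOf x kk j)) kk) := by
  simp only [mfLoop, if_pos h1]
  rw [show (u.foldl (fun (v : List Int × List Int) j =>
        if mfBit (PySem.List.pyGetD x j 0) kk == 1 then (v.1, v.2 ++ [j]) else (v.1 ++ [j], v.2))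
        ([], [])) = (u.filter (fun j => !pOf x kk j), u.filter (pOf x kk)) from by
    simpa [pOf] using foldl_partition (fun j => mfBit (PySem.List.pyGetD x j 0) kk == 1) u ([], [])]
  by_cases hgt : (u.filter (fun j => !pOf x kk j)).length > (u.filter (pOf x kk)).length
  · simp only [if_pos hgt]; cases oxygen <;> simp
  · simp only [if_neg hgt]; cases oxygen <;> simp

lemma mfLoop_ne_nil (x : List Int) (oxygen : Bool) (kk : Nat) :
    ∀ u : List Int, u ≠ [] → mfLoop x oxygen u kk ≠ [] := by
  induction kk with
  | zero => intro u h; simpa [mfLoop] using h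
  | succ kk ih =>
    intro u h
    by_cases h1 : 1 < u.length
    · rw [mfLoop_succ x oxygen u kk h1]
      split_ifs <;>
        first
          | exact h
          | (rename_i hq
             exact ih _ (fun hnil => hq (by simp [hnil])))
    · simp only [mfLoop, if_neg h1]; exact h

lemma mfLoop_pairwise (x : List Int) (oxygen : Bool) (kk : Nat) :
    ∀ u : List Int, u.Pairwise (· < ·) → (mfLoop x oxygen u kk).Pairwise (· < ·) := by
  induction kk with
  | zero => intro u h; simpa [mfLoop] using h
  | succ kk ih =>
    intro u h
    by_cases h1 : 1 < u.length
    · rw [mfLoop_succ x oxygen u kk h1]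
      split_ifs <;> first | exact h | exact ih _ (h.filter _)
    · simp only [mfLoop, if_neg h1]; exact h

-- ===== the main loop correspondence =====
lemma main_loop (x : List Int) (oxygen : Bool) (nb : Nat) (P : List (Int × Int))
    (hsort : P.Pairwise (fun p q => p.1 ≤ q.1))
    (hpos : ∀ p ∈ P, 0 ≤ p.1 ∧ p.1 = (gOf x p.2) % ((2:Int) ^ nb)) :
    ∀ (f : Nat) (u : List Int) (lo hi : Nat), f ≤ nb → lo ≤ hi → hi ≤ P.length →
      (segN P lo hi).Perm (u.map (pairOf x nb)) →
      (∀ p ∈ segN P lo hi, ∀ q ∈ segN P lo hi, p.1.toNat / 2 ^ f = q.1.toNat / 2 ^ f) →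
      ∃ lo' hi' : Nat,
        mfBLoop P oxygen (lo : Int) (hi : Int) f = ((lo' : Int), (hi' : Int)) ∧
        lo ≤ lo' ∧ lo' ≤ hi' ∧ hi' ≤ hi ∧
        (segN P lo' hi').Perm ((mfLoop x oxygen u f).map (pairOf x nb)) := by
  intro f
  induction f with
  | zero =>
    intro u lo hi _ hlh hhi hperm _
    exact ⟨lo, hi, rfl, le_refl _, hlh, le_refl _, by simpa [mfLoop] using hperm⟩
  | succ kk ih =>
    intro u lo hi hf hlh hhi hperm hsh
    have hlenu : u.length = hi - lo := by
      have h1 := hperm.length_eq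
      rw [segN_length P lo hi hlh hhi] at h1
      simpa using h1.symm
    by_cases hbig : 1 < hi - lo
    · -- the element-level probe facts
      have hkpos : ∀ p ∈ segN P lo hi, 0 ≤ p.1 :=
        fun p hp => (hpos p (mem_P_of_mem_segN P lo hi hhi p hp)).1
      have hkk : kk < nb := by omega
      have hdd : ∀ a : Nat, a / 2 ^ kk / 2 = a / 2 ^ (kk + 1) := by
        intro a
        rw [Nat.div_div_eq_div_mul, ← pow_succ]
      have hmono : ∀ i j : Int, (lo:Int) ≤ i → i ≤ j → j < (hi:Int) →
          mfProbe P kk i = true → mfProbe P kk j = true := by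
        intro i j h1 h2 h3 hp
        obtain ⟨iN, rfl⟩ := Int.eq_ofNat_of_zero_le (by omega : 0 ≤ i)
        obtain ⟨jN, rfl⟩ := Int.eq_ofNat_of_zero_le (by omega : 0 ≤ j)
        have hiN1 : lo ≤ iN := by exact_mod_cast h1
        have hjN2 : jN < hi := by exact_mod_cast h3
        have hij : iN ≤ jN := by exact_mod_cast h2
        have hiNlen : iN < P.length := by omega
        have hjNlen : jN < P.length := by omega
        rw [mfProbe_at P kk iN hiNlen] at hp
        rw [mfProbe_at P kk jN hjNlen]
        have hmi : P[iN] ∈ segN P lo hi := getElem_mem_segN P lo hi iN hhi hiN1 (by omega)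
        have hmj : P[jN] ∈ segN P lo hi := getElem_mem_segN P lo hi jN hhi (by omega) hjN2
        have hple : P[iN].1 ≤ P[jN].1 := by
          rcases Nat.lt_or_ge iN jN with hlt | hge
          · exact (List.pairwise_iff_getElem.mp hsort) iN jN hiNlen hjNlen hlt
          · have : iN = jN := by omega
            subst this; exact le_refl _
        have hposi := hkpos _ hmi
        have hposj := hkpos _ hmj
        rw [qpred_true_iff kk _ hposi] at hp
        rw [qpred_true_iff kk _ hposj]
        exact nat_bit_mono (2 ^ kk) P[iN].1.toNat P[jN].1.toNat
          (by omega) (by rw [← pow_succ]; exact hsh _ hmi _ hmj) hp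
      obtain ⟨hs1, hs2, hs3, hs4⟩ := mfSearch_spec P kk (lo:Int) (hi:Int) hmono
        (lo:Int) (hi:Int) (le_refl _) (by omega) (le_refl _)
        (fun i hx1 hx2 => absurd hx1 (by omega))
        (fun i hx1 hx2 => absurd hx1 (by omega))
      set s : Int := mfSearch P kk (lo:Int) (hi:Int) with hsdef
      obtain ⟨sN, hsN⟩ : ∃ sN : Nat, s = (sN : Int) := ⟨s.toNat, (Int.toNat_of_nonneg (by omega)).symm⟩
      have hlosN : lo ≤ sN := by omega
      have hsNhi : sN ≤ hi := by omega
      -- elements left of the split have bit kk clear, elements right of it have it set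
      have hleft : ∀ p ∈ segN P lo sN, qpred kk p = false := by
        intro p hp
        rw [mem_segN P lo sN (by omega) p] at hp
        obtain ⟨t, ht, rfl⟩ := hp
        rw [← mfProbe_at P kk (lo + t) (by omega)]
        exact hs3 _ (by omega) (by omega)
      have hright : ∀ p ∈ segN P sN hi, qpred kk p = true := by
        intro p hp
        rw [mem_segN P sN hi hhi p] at hp
        obtain ⟨t, ht, rfl⟩ := hp
        rw [← mfProbe_at P kk (sN + t) (by omega)]
        exact hs4 _ (by omega) (by omega)
      -- predicate agreement between the two programs
      have hagree : ∀ j ∈ u, qpred kk (pairOf x nb j) = pOf x kk j := by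
        intro j _
        unfold qpred pairOf pOf keyOf
        rw [show (PySem.List.pyGetD x j 0) = gOf x j from rfl,
          band_mask_eq_emod (gOf x j) nb]
        show (bit01 (gOf x j % (2:Int) ^ nb) kk != 0) = (mfBit (PySem.List.pyGetD x j 0) kk == 1)
        rw [bit01_emod (gOf x j) nb kk hkk, mfBit_eq_bit01]
        rcases bit01_01 (PySem.List.pyGetD x j 0) kk with h | h <;>
          · show (bit01 (gOf x j) kk != 0) = _
            rw [show gOf x j = PySem.List.pyGetD x j 0 from rfl, h]
            rfl
      -- the two halves of the block are the images of A's two buckets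
      have hsplit := segN_append P lo sN hi hlosN hsNhi
      have hfilt1 : (segN P sN hi).Perm ((u.filter (pOf x kk)).map (pairOf x nb)) := by
        have h1 := hperm.filter (qpred kk)
        rw [hsplit, List.filter_append,
          List.filter_eq_nil_iff.mpr (by intro p hp; simp [hleft p hp]),
          List.filter_eq_self.mpr (fun p hp => hright p hp), List.nil_append] at h1
        rwa [List.filter_map, List.filter_congr (fun j hj => by
          simp only [Function.comp_apply]; exact hagree j hj)] at h1
      have hfilt0 : (segN P lo sN).Perm ((u.filter (fun j => !pOf x kk j)).map (pairOf x nb)) := by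
        have h1 := hperm.filter (fun e => !qpred kk e)
        rw [hsplit, List.filter_append,
          List.filter_eq_self.mpr (fun p hp => by simp [hleft p hp]),
          List.filter_eq_nil_iff.mpr (by intro p hp; simp [hright p hp]),
          List.append_nil] at h1
        rwa [List.filter_map, List.filter_congr (fun j hj => by
          simp only [Function.comp_apply]; rw [hagree j hj])] at h1
      have hq1len : (u.filter (pOf x kk)).length = hi - sN := by
        have := hfilt1.length_eq
        rw [segN_length P sN hi hsNhi hhi] at this
        simpa using this.symm
      have hq0len : (u.filter (fun j => !pOf x kk j)).length = sN - lo := by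
        have := hfilt0.length_eq
        rw [segN_length P lo sN hlosN (by omega)] at this
        simpa using this.symm
      -- the two loops take aligned branches
      have hAstep := mfLoop_succ x oxygen u kk (by omega)
      have hBstep : mfBLoop P oxygen (lo:Int) (hi:Int) (kk+1) =
          (if (if s - (lo:Int) > (hi:Int) - s then !oxygen else oxygen)
           then (if (hi:Int) - s = 0 then ((lo:Int), (hi:Int))
                 else mfBLoop P oxygen s (hi:Int) kk)
           else (if s - (lo:Int) = 0 then ((lo:Int), (hi:Int))
                 else mfBLoop P oxygen (lo:Int) s kk)) := by
        simp only [mfBLoop]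
        rw [if_pos (by omega)]
      have hbool : (if s - (lo:Int) > (hi:Int) - s then !oxygen else oxygen) =
          (if (u.filter (fun j => !pOf x kk j)).length > (u.filter (pOf x kk)).length
           then oxygen == false else oxygen == true) := by
        rw [hq0len, hq1len]
        by_cases hgt : s - (lo:Int) > (hi:Int) - s
        · rw [if_pos hgt, if_pos (by omega)]
          cases oxygen <;> rfl
        · rw [if_neg hgt, if_neg (by omega)]
          cases oxygen <;> rfl
      rw [hAstep, hBstep, hbool]
      -- the residual high-bits invariant for the recursive calls
      have hshared : ∀ (lo2 hi2 : Nat), lo ≤ lo2 → hi2 ≤ hi → lo2 ≤ hi2 →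
          (∀ p ∈ segN P lo2 hi2, ∀ q ∈ segN P lo2 hi2,
            p.1.toNat / 2 ^ kk % 2 = q.1.toNat / 2 ^ kk % 2) →
          (∀ p ∈ segN P lo2 hi2, ∀ q ∈ segN P lo2 hi2,
            p.1.toNat / 2 ^ kk = q.1.toNat / 2 ^ kk) := by
        intro lo2 hi2 hx1 hx2 hx3 hbits p hp q hq
        have hpw : p ∈ segN P lo hi := by
          rw [mem_segN P lo2 hi2 (by omega) p] at hp
          obtain ⟨t, ht, rfl⟩ := hp
          exact getElem_mem_segN P lo hi (lo2 + t) hhi (by omega) (by omega)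
        have hqw : q ∈ segN P lo hi := by
          rw [mem_segN P lo2 hi2 (by omega) q] at hq
          obtain ⟨t, ht, rfl⟩ := hq
          exact getElem_mem_segN P lo hi (lo2 + t) hhi (by omega) (by omega)
        have h1 := hsh p hpw q hqw
        have h2 := hbits p hp q hq
        have h3 := hdd p.1.toNat
        have h4 := hdd q.1.toNat
        omega
      by_cases hb : (if (u.filter (fun j => !pOf x kk j)).length > (u.filter (pOf x kk)).length
          then oxygen == false else oxygen == true)
      · rw [if_pos hb, if_pos hb]
        by_cases hz : (u.filter (pOf x kk)).length = 0
        · rw [if_pos hz, if_pos (by omega)]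
          exact ⟨lo, hi, rfl, le_refl _, hlh, le_refl _, hperm⟩
        · rw [if_neg hz, if_neg (by omega), hsN]
          obtain ⟨lo', hi', heq, g1, g2, g3, g4⟩ := ih (u.filter (pOf x kk)) sN hi
            (by omega) hsNhi hhi hfilt1
            (hshared sN hi hlosN (le_refl _) hsNhi (fun p hp q hq => by
              rw [(qpred_true_iff kk p (hkpos p (by rw [hsplit]; exact List.mem_append_right _ hp))).mp (hright p hp),
                (qpred_true_iff kk q (hkpos q (by rw [hsplit]; exact List.mem_append_right _ hq))).mp (hright q hq)]))
          exact ⟨lo', hi', heq, by omega, g2, g3, g4⟩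
      · rw [if_neg hb, if_neg hb]
        by_cases hz : (u.filter (fun j => !pOf x kk j)).length = 0
        · rw [if_pos hz, if_pos (by omega)]
          exact ⟨lo, hi, rfl, le_refl _, hlh, le_refl _, hperm⟩
        · rw [if_neg hz, if_neg (by omega), hsN]
          obtain ⟨lo', hi', heq, g1, g2, g3, g4⟩ := ih (u.filter (fun j => !pOf x kk j)) lo sN
            (by omega) hlosN (by omega) hfilt0
            (hshared lo sN (le_refl _) hsNhi hlosN (fun p hp q hq => by
              have hp0 : p.1.toNat / 2 ^ kk % 2 ≠ 1 := by
                intro hc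
                have := (qpred_true_iff kk p (hkpos p (by rw [hsplit]; exact List.mem_append_left _ hp))).mpr hc
                rw [hleft p hp] at this
                exact absurd this (by simp)
              have hq0 : q.1.toNat / 2 ^ kk % 2 ≠ 1 := by
                intro hc
                have := (qpred_true_iff kk q (hkpos q (by rw [hsplit]; exact List.mem_append_left _ hq))).mpr hc
                rw [hleft q hq] at this
                exact absurd this (by simp)
              omega))
          exact ⟨lo', hi', heq, le_refl lo |>.trans g1, g2, by omega, g4⟩
    · have hA : mfLoop x oxygen u (kk+1) = u := by
        simp only [mfLoop]; rw [if_neg (by omega)]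
      have hB : mfBLoop P oxygen (lo:Int) (hi:Int) (kk+1) = ((lo:Int), (hi:Int)) := by
        simp only [mfBLoop]
        rw [if_neg (by omega)]
      exact ⟨lo, hi, hB, le_refl _, hlh, le_refl _, by rw [hA]; exact hperm⟩

-- initial conditions for main_loop
lemma pyRange_pairwise (m : Nat) :
    (PySem.List.pyRange 0 (m : Int) 1).Pairwise (· < ·) := by
  rw [PySem.List.pyRange_one]
  refine List.Pairwise.map _ (fun a b hab => ?_) List.pairwise_lt_range
  omega

lemma pyRange_ne_nil (m : Nat) (hm : 0 < m) :
    PySem.List.pyRange 0 (m : Int) 1 ≠ [] := by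
  intro hnil
  have := PySem.List.length_pyRange_one 0 (m : Int)
  rw [hnil] at this
  simp at this
  omega

-- ===== VERDICT (by name: the statement is the Claim_ definition above) =====
theorem mode_filter_spec : Claim_equal_mode_filter := by
  intro x n oxygen _ hpre
  unfold Spec_mode_filter mode_filter
  have hnb : (if n > 0 then n else 0).toNat = n.toNat := by split_ifs <;> omega
  set N : Nat := n.toNat with hN
  have hmask : ((1 <<< N : Nat) : Int) - 1 = (2:Int) ^ N - 1 := by
    rw [Nat.one_shiftLeft, cast_two_pow]
  set u0 : List Int := PySem.List.pyRange 0 (x.length : Int) 1 with hu0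
  simp only [mode_filter_alt, hnb, hmask]
  set P : List (Int × Int) := PySem.List.sorted
    ((PySem.List.enumerate x 0).map (fun iv => (PySem.Int.band iv.2 ((2:Int) ^ N - 1), iv.1)))
    (fun p => p.1) false with hP
  have hplist : (PySem.List.enumerate x 0).map
      (fun iv => (PySem.Int.band iv.2 ((2:Int) ^ N - 1), iv.1)) = u0.map (pairOf x N) := by
    rw [show PySem.List.enumerate x 0 = PySem.List.enumerate x from rfl,
      PySem.List.enumerate_eq_map_pyRange x 0,
      show PySem.List.pyRange 0 (PySem.List.len x) = u0 by rw [hu0]; simp [PySem.List.len_eq],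
      List.map_map]
    rfl
  have hperm' : P.Perm (u0.map (pairOf x N)) := by
    rw [hP, hplist]
    exact PySem.List.sorted_perm _ _ _
  have hsort : P.Pairwise (fun p q => p.1 ≤ q.1) :=
    PySem.List.sorted_pairwise _ _
  have hposP : ∀ p ∈ P, 0 ≤ p.1 ∧ p.1 = (gOf x p.2) % ((2:Int) ^ N) := by
    intro p hp
    rw [hP, PySem.List.mem_sorted, hplist, List.mem_map] at hp
    obtain ⟨j, _, rfl⟩ := hp
    unfold pairOf keyOf
    rw [band_mask_eq_emod]
    refine ⟨Int.emod_nonneg _ (by positivity), rfl⟩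
  have hseg0 : segN P 0 P.length = P := by
    simp [segN]
  have hperm0 : (segN P 0 P.length).Perm (u0.map (pairOf x N)) := by
    rw [hseg0]; exact hperm'
  have hsh0 : ∀ p ∈ segN P 0 P.length, ∀ q ∈ segN P 0 P.length,
      p.1.toNat / 2 ^ N = q.1.toNat / 2 ^ N := by
    intro p hp q hq
    rw [hseg0] at hp hq
    have h2 := cast_two_pow N
    have hbp : p.1.toNat < 2 ^ N := by
      have h1 := (hposP p hp).2
      have h3 := Int.emod_lt_of_pos (gOf x p.2) (show (0:Int) < (2:Int) ^ N by positivity)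
      omega
    have hbq : q.1.toNat < 2 ^ N := by
      have h1 := (hposP q hq).2
      have h3 := Int.emod_lt_of_pos (gOf x q.2) (show (0:Int) < (2:Int) ^ N by positivity)
      omega
    rw [Nat.div_eq_of_lt hbp, Nat.div_eq_of_lt hbq]
  obtain ⟨lo', hi', heq, hg1, hg2, hg3, hpermF⟩ :=
    main_loop x oxygen N P hsort hposP N u0 0 P.length (le_refl _) (by omega) (le_refl _)
      hperm0 hsh0
  rw [show ((0:Nat) : Int) = (0:Int) from rfl] at heq
  rw [heq]
  -- the A side result
  set u' : List Int := mfLoop x oxygen u0 N with hu'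
  have hne : u' ≠ [] :=
    mfLoop_ne_nil x oxygen N u0 (pyRange_ne_nil x.length (by
      cases x with
      | nil => exact absurd rfl hpre
      | cons a t => simp))
  obtain ⟨j0, rest, hcons⟩ : ∃ j0 rest, u' = j0 :: rest := by
    cases hu : u' with
    | nil => exact absurd hu hne
    | cons a l => exact ⟨a, l, rfl⟩
  have hpw : u'.Pairwise (· < ·) := mfLoop_pairwise x oxygen N u0 (pyRange_pairwise x.length)
  -- the B side block
  have hslice : PySem.List.slice P (some ((lo' : Nat) : Int)) (some ((hi' : Nat) : Int))
      = segN P lo' hi' := by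
    rw [PySem.List.slice_toNat P (by omega) (by omega)]
    simp [segN]
  rw [hslice]
  have hmapsnd : ((segN P lo' hi').map (fun p => p.2)).Perm u' := by
    have h1 := hpermF.map (fun p : Int × Int => p.2)
    rw [List.map_map] at h1
    rw [show (fun p : Int × Int => p.2) ∘ pairOf x N = fun j => j from rfl] at h1
    simpa using h1
  have hmin : PySem.List.min? ((segN P lo' hi').map (fun p => p.2)) (fun i => i) = some j0 := by
    cases hm : PySem.List.min? ((segN P lo' hi').map (fun p => p.2)) (fun i => i) with
    | none =>
      rw [PySem.List.min?_eq_none_iff] at hm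
      rw [hm] at hmapsnd
      exact absurd (hmapsnd.symm.eq_nil ▸ hcons ▸ rfl : u' = []) hne
    | some m =>
      have hmem : m ∈ u' := hmapsnd.mem_iff.mp (PySem.List.min?_mem hm)
      have hle : m ≤ j0 := by
        have := PySem.List.min?_isMin hm j0 (hmapsnd.mem_iff.mpr (by rw [hcons]; exact List.mem_cons_self))
        simpa using this
      have hge : j0 ≤ m := by
        rw [hcons] at hmem
        rcases List.mem_cons.mp hmem with h | h
        · omega
        · have := (List.pairwise_cons.mp (hcons ▸ hpw)).1 m h
          omega
      rw [show m = j0 by omega]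
  rw [hmin]
  rw [hcons]
  rw [PySem.List.pyGetD_zero_cons]
  rfl
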